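-- pv_equiv track=rewrite | github.com/Times-Z/GeekMagic-Open-Firmware | scripts/generate_openapi.py | _preprocess_multiline_annotations
-- ===== SOURCE A (Python) =====
-- def _preprocess_multiline_annotations(text):
--     """
--     Combine multiline @openapi comments into single lines.
--     Handles cases where comment lines starting with // are continuation lines.
--     """
--     lines = text.split('\n')
--     result = []
--     i = 0
--     while i < len(lines):
--         line = lines[i]
--         # Check if this line contains @openapi
--         if '@openapi' in line:
--             # Extract the base line and accumulate continuation lines
--             combined = line
--             j = i + 1
--             # Look ahead for continuation lines (lines that start with // but don't have @openapi)
--             while j < len(lines):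
--                 next_line = lines[j]
--                 stripped = next_line.strip()
--                 # Check if it's a continuation (starts with // and is likely a continuation)
--                 if stripped.startswith('//') and '@openapi' not in next_line:
--                     # Remove the // prefix and any leading/trailing whitespace, then append
--                     continuation = stripped[2:].strip()
--                     combined += ' ' + continuation
--                     j += 1
--                 else:
--                     break
--             result.append(combined)
--             i = j
--         else:
--             result.append(line)
--             i += 1
--     return '\n'.join(result)
-- ===== SOURCE B (Python) =====
-- def _preprocess_multiline_annotations(text):
--     """Single state-machine pass: `combined` holds the @openapi line being merged (None otherwise)."""
--     result = []
--     combined = None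
--     for line in text.split('\n'):
--         if '@openapi' in line:
--             if combined is not None:
--                 result.append(combined)
--             combined = line
--         else:
--             stripped = line.strip()
--             if combined is not None and stripped.startswith('//'):
--                 combined += ' ' + stripped[2:].strip()
--             else:
--                 if combined is not None:
--                     result.append(combined)
--                     combined = None
--                 result.append(line)
--     if combined is not None:
--         result.append(combined)
--     return '\n'.join(result)
-- ===== Notes on version B (the rewrite author's own statement) =====
-- stated objective: simpler
-- what changed: Replaced A's nested while loops with manual index jumping (outer index i, inner lookahead index j) by a single for-loop over the lines that maintains one Option-like state variable `combined`, flushed at the end.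
import Mathlib
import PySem

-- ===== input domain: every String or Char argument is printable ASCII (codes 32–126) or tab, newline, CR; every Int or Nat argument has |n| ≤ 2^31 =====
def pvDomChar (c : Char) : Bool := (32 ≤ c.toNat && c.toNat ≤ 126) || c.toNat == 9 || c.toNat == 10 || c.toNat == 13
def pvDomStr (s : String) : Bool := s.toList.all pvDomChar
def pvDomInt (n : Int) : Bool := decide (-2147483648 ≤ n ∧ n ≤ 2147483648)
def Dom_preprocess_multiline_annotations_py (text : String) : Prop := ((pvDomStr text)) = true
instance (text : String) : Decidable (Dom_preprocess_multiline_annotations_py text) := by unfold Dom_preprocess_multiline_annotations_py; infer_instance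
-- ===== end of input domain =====

-- B replaces A's nested while loops with index jumping by a single state-machine fold
-- carrying one Option accumulator (objective: simpler decomposition, same cost).

-- ===== PORT A =====
-- inner while loop of A: accumulate continuation lines into `combined`, return it with the unconsumed rest
def pvEatA (combined : String) : List String → String × List String
  | [] => (combined, [])
  | next :: rest =>
    let stripped := PySem.Str.strip next
    if PySem.Str.startswith stripped "//" && !(PySem.Str.isIn "@openapi" next) then
      pvEatA (combined ++ " " ++ PySem.Str.strip (PySem.Str.slice stripped (some 2) none)) rest
    else (combined, next :: rest)

theorem pvEatA_len (c : String) (xs : List String) : (pvEatA c xs).2.length ≤ xs.length := by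
  induction xs generalizing c with
  | nil => simp [pvEatA]
  | cons x rest ih =>
    simp only [pvEatA]
    split
    · exact Nat.le_succ_of_le (ih _)
    · simp

-- outer while loop of A
def pvLoopA : List String → List String
  | [] => []
  | line :: rest =>
    if PySem.Str.isIn "@openapi" line then
      let p := pvEatA line rest
      p.1 :: pvLoopA p.2
    else line :: pvLoopA rest
termination_by xs => xs.length
decreasing_by
  · exact Nat.lt_succ_of_le (pvEatA_len line rest)
  · simp

def preprocess_multiline_annotations_py (text : String) : String :=
  PySem.Str.join "\n" (pvLoopA ((PySem.Str.split? text "\n").getD []))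

-- ===== PORT B =====
-- one step of B's for-loop: state = (result so far, pending combined line or none)
def pvStepB (st : List String × Option String) (line : String) : List String × Option String :=
  if PySem.Str.isIn "@openapi" line then
    match st.2 with
    | some c => (st.1 ++ [c], some line)
    | none => (st.1, some line)
  else
    let stripped := PySem.Str.strip line
    match st.2 with
    | some c =>
      if PySem.Str.startswith stripped "//" then
        (st.1, some (c ++ " " ++ PySem.Str.strip (PySem.Str.slice stripped (some 2) none)))
      else (st.1 ++ [c] ++ [line], none)
    | none => (st.1 ++ [line], none)

def preprocess_multiline_annotations_py_alt (text : String) : String :=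
  let st := ((PySem.Str.split? text "\n").getD []).foldl pvStepB ([], none)
  PySem.Str.join "\n" (st.1 ++ st.2.toList)

-- ===== PRECONDITION & SPEC =====
def Spec_preprocess_multiline_annotations_py (text : String) (out : String) : Prop := out = preprocess_multiline_annotations_py_alt text
instance (text : String) (out : String) : Decidable (Spec_preprocess_multiline_annotations_py text out) := by unfold Spec_preprocess_multiline_annotations_py; infer_instance

-- ===== CLAIM (what is proved, stated in full; the proofs are below) =====
def Claim_equal_preprocess_multiline_annotations_py : Prop := ∀ (text : String), Dom_preprocess_multiline_annotations_py text → Spec_preprocess_multiline_annotations_py text (preprocess_multiline_annotations_py text)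

-- ===== LEMMAS AND PROOFS =====

-- proof-side recursive rendering of B's fold
def pvLoopB (comb : Option String) : List String → List String
  | [] => comb.toList
  | line :: rest =>
    if PySem.Str.isIn "@openapi" line then
      comb.toList ++ pvLoopB (some line) rest
    else
      let stripped := PySem.Str.strip line
      match comb with
      | some c =>
        if PySem.Str.startswith stripped "//" then
          pvLoopB (some (c ++ " " ++ PySem.Str.strip (PySem.Str.slice stripped (some 2) none))) rest
        else c :: line :: pvLoopB none rest
      | none => line :: pvLoopB none rest


theorem pvFoldB_eq (xs : List String) (acc : List String) (comb : Option String) :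
    (xs.foldl pvStepB (acc, comb)).1 ++ (xs.foldl pvStepB (acc, comb)).2.toList
      = acc ++ pvLoopB comb xs := by
  induction xs generalizing acc comb with
  | nil => simp [pvLoopB]
  | cons line rest ih =>
    simp only [List.foldl_cons]
    by_cases h : PySem.Str.isIn "@openapi" line = true
    · have h' := h; simp at h'
      cases comb with
      | some c => simp [pvStepB, pvLoopB, h', ih]
      | none => simp [pvStepB, pvLoopB, h', ih]
    · have h' := h; simp at h'
      cases comb with
      | some c =>
        by_cases hs : PySem.Str.startswith (PySem.Str.strip line) "//" = true
        · have hs' := hs; simp at hs'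
          simp [pvStepB, pvLoopB, h', hs', ih]
        · have hs' := hs; simp at hs'
          simp [pvStepB, pvLoopB, h', hs', ih]
      | none => simp [pvStepB, pvLoopB, h', ih]

theorem pvLoopB_some (xs : List String) (c : String) :
    pvLoopB (some c) xs = (pvEatA c xs).1 :: pvLoopB none (pvEatA c xs).2 := by
  induction xs generalizing c with
  | nil => simp [pvLoopB, pvEatA]
  | cons line rest ih =>
    by_cases h : PySem.Str.isIn "@openapi" line = true
    · have h' := h; simp at h'
      simp [pvLoopB, pvEatA, h']
    · have h' := h; simp at h'
      by_cases hs : PySem.Str.startswith (PySem.Str.strip line) "//" = true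
      · have hs' := hs; simp at hs'
        simp [pvLoopB, pvEatA, h', hs', ih]
      · have hs' := hs; simp at hs'
        simp [pvLoopB, pvEatA, h', hs']

theorem pvLoopA_eq_loopB : ∀ (n : ℕ) (xs : List String), xs.length ≤ n → pvLoopA xs = pvLoopB none xs := by
  intro n
  induction n with
  | zero =>
    intro xs h
    have : xs = [] := List.length_eq_zero_iff.mp (Nat.le_zero.mp h)
    simp [this, pvLoopA, pvLoopB]
  | succ n ih =>
    intro xs h
    match xs with
    | [] => simp [pvLoopA, pvLoopB]
    | line :: rest =>
      by_cases hl : PySem.Str.isIn "@openapi" line = true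
      · have hl' := hl; simp at hl'
        rw [pvLoopA]
        simp only [hl, if_true]
        rw [ih _ (Nat.le_trans (pvEatA_len line rest) (Nat.succ_le_succ_iff.mp h)), ← pvLoopB_some]
        simp [pvLoopB, hl']
      · have hl' := hl; simp at hl'
        rw [pvLoopA]
        simp only [hl]
        rw [ih rest (Nat.succ_le_succ_iff.mp h)]
        simp [pvLoopB, hl']

-- ===== VERDICT (by name: the statement is the Claim_ definition above) =====
theorem preprocess_multiline_annotations_py_spec : Claim_equal_preprocess_multiline_annotations_py := by
  intro text _
  unfold Spec_preprocess_multiline_annotations_py preprocess_multiline_annotations_py preprocess_multiline_annotations_py_alt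
  rw [pvLoopA_eq_loopB ((PySem.Str.split? text "\n").getD []).length _ (Nat.le_refl _)]
  simp only [pvFoldB_eq, List.nil_append]
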